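-- pv_equiv track=rewrite | github.com/ShannonJWirtz/advent-of-code | 2021/day_11/solution.py | get_flashes
-- ===== SOURCE A (Python) =====
-- def get_adjacents_and_initial_values(inputs):
--
--     h, w = len(inputs), len(inputs[0])
--
--     adjacents = dict()
--     initial_values = dict()
--
--     for i, line in enumerate(inputs):
--         for j, val in enumerate(line):
--             initial_values[(i,j)] = int(val)
--             adjacents[(i, j)] = set((n, m)
--                                     for n in range(i - 1, i + 2)
--                                     for m in range(j - 1, j + 2)
--                                     if 0 <= n < h and 0 <= m < w and
--                                     not (n, m) == (i, j))
--
--     return adjacents, initial_values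
--
-- def get_flashes(inputs, num):
--
--     adjacents, values = get_adjacents_and_initial_values(inputs)
--     flashes = 0
--
--     for _ in range(num):
--         values = {loc: val + 1 for loc, val in values.items()}
--         flashed_locs = [loc for loc, val in values.items() if val > 9]
--
--         while len(flashed_locs) > 0:
--             flashed_loc = flashed_locs.pop()
--             for adj in adjacents[flashed_loc]:
--                 if values[adj] <= 9:
--                     values[adj] += 1
--                     if values[adj] > 9:
--                         flashed_locs.append(adj)
--
--         flashes += len([val for val in values.values() if val > 9])
--         values = {loc: val if val <= 9 else 0 for loc, val in values.items()}
--
--     return flashes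
-- ===== SOURCE B (Python) =====
-- def get_flashes(inputs, num):
--     h, w = len(inputs), len(inputs[0])
--     grid = [[int(c) for c in row] for row in inputs]
--
--     def fired_neighbors(i, j, flashed):
--         return sum((a, b) in flashed
--                    for a in (i - 1, i, i + 1)
--                    for b in (j - 1, j, j + 1)
--                    if (a, b) != (i, j))
--
--     total = 0
--     for _ in range(num):
--         flashed = set()
--         while True:
--             new = [(i, j) for i in range(h) for j in range(w)
--                    if (i, j) not in flashed
--                    and grid[i][j] + 1 + fired_neighbors(i, j, flashed) > 9]
--             if not new:
--                 break
--             flashed.update(new)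
--         total += len(flashed)
--         grid = [[0 if (i, j) in flashed else
--                  grid[i][j] + 1 + fired_neighbors(i, j, flashed)
--                  for j in range(w)] for i in range(h)]
--     return total
-- ===== Notes on version B (the rewrite author's own statement) =====
-- stated objective: alternative
-- what changed: Replaces A's precomputed adjacency-set dicts and mutating stack-driven cascade by a per-step monotone fixpoint iteration: repeated pure full-grid scans over a 2D list grid that grow a flashed set (neighbours by coordinate arithmetic, no worklist, no in-cascade mutation), then one pass rebuilds the grid from the final flashed set.
-- outside the precondition, e.g. on get_flashes(['12', '3'], 1): A returns 0, B raises IndexError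
import Mathlib
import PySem

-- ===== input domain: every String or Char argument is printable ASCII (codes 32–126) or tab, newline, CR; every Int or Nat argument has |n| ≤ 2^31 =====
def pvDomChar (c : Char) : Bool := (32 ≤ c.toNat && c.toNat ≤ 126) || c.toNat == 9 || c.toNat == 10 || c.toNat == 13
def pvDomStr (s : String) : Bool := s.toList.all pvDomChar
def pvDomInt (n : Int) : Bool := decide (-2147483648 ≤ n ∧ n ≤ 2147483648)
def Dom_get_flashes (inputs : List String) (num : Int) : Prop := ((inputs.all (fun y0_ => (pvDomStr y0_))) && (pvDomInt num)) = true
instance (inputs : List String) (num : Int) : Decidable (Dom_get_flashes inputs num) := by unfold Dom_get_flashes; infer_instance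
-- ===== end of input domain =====

-- B replaces A's adjacency-dict + mutating stack cascade by a per-step monotone fixpoint
-- iteration of pure full-grid scans over a 2D grid (alternative decomposition, not faster).

-- ===== PORT A =====

-- set((n, m) for n in range(i-1, i+2) for m in range(j-1, j+2) if 0 <= n < h and 0 <= m < w and not (n, m) == (i, j))
def pvAdjList (h w i j : Int) : List (Int × Int) :=
  (PySem.List.pyRange (i - 1) (i + 2) 1).flatMap (fun n =>
    ((PySem.List.pyRange (j - 1) (j + 2) 1).filter (fun m =>
      decide (0 ≤ n ∧ n < h ∧ 0 ≤ m ∧ m < w ∧ ¬(n = i ∧ m = j)))).map (fun m => (n, m)))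

def get_adjacents_and_initial_values (inputs : List String) :
    PySem.Dict (Int × Int) (PySem.Set (Int × Int)) × PySem.Dict (Int × Int) Int :=
  let h : Int := inputs.length
  let w : Int := PySem.Str.len ((PySem.List.pyGet? inputs 0).getD "")  -- inputs[0]; IndexError (empty list) excluded by Pre_
  (PySem.List.enumerate inputs).foldl (fun ds iline =>
    (PySem.List.enumerate iline.2.toList).foldl (fun ds jval =>
      (ds.1.insert (iline.1, jval.1) (PySem.Set.ofList (pvAdjList h w iline.1 jval.1)),
       -- int(val); ValueError (non-digit char) excluded by Pre_
       ds.2.insert (iline.1, jval.1) ((PySem.Int.ofChars? [jval.2]).getD 0)))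
      ds)
    (PySem.Dict.empty, PySem.Dict.empty)

-- the 'while len(flashed_locs) > 0' cascade; fuel is an upper bound on the number of
-- iterations (each pops one element), proved sufficient below — a pure totality guard
def pvCascade (adjacents : PySem.Dict (Int × Int) (PySem.Set (Int × Int))) :
    Nat → PySem.Dict (Int × Int) Int → List (Int × Int) → PySem.Dict (Int × Int) Int
  | 0, values, _ => values
  | _ + 1, values, stack =>
    match stack.getLast? with
    | none => values
    | some loc =>
      let st := ((adjacents.getD loc []).foldl (fun s adj =>
        if s.1.getD adj 0 ≤ 9 then  -- values[adj]; KeyError excluded by Pre_ (rectangular grid)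
          let v' := s.1.modify adj 0 (· + 1)
          if 9 < v'.getD adj 0 then (v', s.2 ++ [adj]) else (v', s.2)
        else s) (values, stack.dropLast))
      pvCascade adjacents ‹Nat› st.1 st.2

def get_flashes (inputs : List String) (num : Int) : Int :=
  let av := get_adjacents_and_initial_values inputs
  ((PySem.List.pyRange 0 num 1).foldl (fun st _ =>
    let values := PySem.Dict.ofList (st.1.items.map (fun p => (p.1, p.2 + 1)))
    let flashed_locs := (values.items.filter (fun p => decide (9 < p.2))).map (fun p => p.1)
    let values := pvCascade av.1 (values.size + flashed_locs.length) values flashed_locs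
    let flashes := st.2 + ((values.values.filter (fun v => decide (9 < v))).length : Int)
    (PySem.Dict.ofList (values.items.map (fun p => (p.1, if p.2 ≤ 9 then p.2 else 0))), flashes))
    (av.2, 0)).2

-- ===== PORT B =====

-- sum((a, b) in flashed for a in (i-1, i, i+1) for b in (j-1, j, j+1) if (a, b) != (i, j))
def pvFiredNeighbors (i j : Int) (flashed : PySem.Set (Int × Int)) : Int :=
  ((([i - 1, i, i + 1].flatMap (fun a => [j - 1, j, j + 1].map (fun b => (a, b)))).filter
      (fun p => decide (p ≠ (i, j)))).map
    (fun p => if PySem.Set.contains flashed p then (1 : Int) else 0)).sum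

-- one full-grid pass: the list 'new' of not-yet-flashed cells whose value would exceed 9
def pvNewFlashes (grid : List (List Int)) (h w : Int) (flashed : PySem.Set (Int × Int)) :
    List (Int × Int) :=
  (PySem.List.pyRange 0 h 1).flatMap (fun i =>
    ((PySem.List.pyRange 0 w 1).filter (fun j =>
      !PySem.Set.contains flashed (i, j) &&
        decide (9 < PySem.List.pyGetD ((PySem.List.pyGet? grid i).getD []) j 0 + 1 +
          pvFiredNeighbors i j flashed))).map (fun j => (i, j)))

-- the 'while True' loop: grow 'flashed' until a pass adds nothing; fuel = h*w+1 passes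
-- always suffices (each non-final pass adds a cell) — a pure totality guard
def pvSaturate (grid : List (List Int)) (h w : Int) :
    Nat → PySem.Set (Int × Int) → PySem.Set (Int × Int)
  | 0, flashed => flashed
  | fuel + 1, flashed =>
    let new := pvNewFlashes grid h w flashed
    if new.isEmpty then flashed
    else pvSaturate grid h w fuel (PySem.Set.update flashed new)

def get_flashes_alt (inputs : List String) (num : Int) : Int :=
  let h : Int := inputs.length
  let w : Int := PySem.Str.len ((PySem.List.pyGet? inputs 0).getD "")  -- inputs[0]; IndexError excluded by Pre_
  let grid0 := inputs.map (fun row => row.toList.map (fun c => (PySem.Int.ofChars? [c]).getD 0))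
  ((PySem.List.pyRange 0 num 1).foldl (fun st _ =>
    let flashed := pvSaturate st.1 h w ((h * w).toNat + 1) PySem.Set.empty
    let total := st.2 + PySem.Set.len flashed
    let grid := (PySem.List.pyRange 0 h 1).map (fun i =>
      (PySem.List.pyRange 0 w 1).map (fun j =>
        if PySem.Set.contains flashed (i, j) then 0
        else PySem.List.pyGetD ((PySem.List.pyGet? st.1 i).getD []) j 0 + 1 +
          pvFiredNeighbors i j flashed))
    (grid, total)) (grid0, 0)).2

-- ===== PRECONDITION & SPEC =====
-- Pre_ excludes inputs where A raises (empty list: IndexError; a non-digit character: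
-- ValueError; a non-rectangular grid: latent KeyError in the cascade) — on the ragged
-- digit grids where no cascade fires A happens to return, but B's grid scan raises
-- IndexError there (see claim cites), so they stay outside Pre_.
def Pre_get_flashes (inputs : List String) (num : Int) : Prop :=
  inputs ≠ [] ∧ ∀ s ∈ inputs,
    s.toList.length = (inputs.headI).toList.length ∧
    (s.toList.all (fun c => decide ('0' ≤ c) && decide (c ≤ '9'))) = true
instance (inputs : List String) (num : Int) : Decidable (Pre_get_flashes inputs num) := by
  unfold Pre_get_flashes; infer_instance

def pvWitness_get_flashes : List String × Int := (["19", "91"], 3)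

def Spec_get_flashes (inputs : List String) (num : Int) (out : Int) : Prop :=
  out = get_flashes_alt inputs num
instance (inputs : List String) (num : Int) (out : Int) : Decidable (Spec_get_flashes inputs num out) := by
  unfold Spec_get_flashes; infer_instance

-- ===== CLAIM (what is proved, stated in full; the proofs are below) =====
def Claim_equal_get_flashes : Prop := ∀ (inputs : List String) (num : Int),
  Dom_get_flashes inputs num → Pre_get_flashes inputs num →
    Spec_get_flashes inputs num (get_flashes inputs num)

-- ===== LEMMAS AND PROOFS =====

-- ---- grid combinatorics ----
def pvCells (h w : Int) : List (Int × Int) :=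
  (PySem.List.pyRange 0 h 1).flatMap (fun i => (PySem.List.pyRange 0 w 1).map (fun j => (i, j)))

lemma pv_mem_cells {h w : Int} {c : Int × Int} :
    c ∈ pvCells h w ↔ 0 ≤ c.1 ∧ c.1 < h ∧ 0 ≤ c.2 ∧ c.2 < w := by
  obtain ⟨i, j⟩ := c
  simp only [pvCells, List.mem_flatMap, List.mem_map, PySem.List.mem_pyRange_one, Prod.mk.injEq]
  constructor
  · rintro ⟨n, hn, m, hm, rfl, rfl⟩; exact ⟨hn.1, hn.2, hm.1, hm.2⟩
  · rintro ⟨h1, h2, h3, h4⟩; exact ⟨i, ⟨h1, h2⟩, j, ⟨h3, h4⟩, rfl, rfl⟩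

lemma pv_nodup_pyRange01 (h : Int) : (PySem.List.pyRange 0 h 1).Nodup := by
  rcases le_or_gt h 0 with hh | hh
  · have : PySem.List.pyRange 0 h 1 = [] := by
      by_contra hne
      obtain ⟨x, hx⟩ := List.exists_mem_of_ne_nil _ hne
      have := PySem.List.mem_pyRange_one.1 hx; omega
    simp [this]
  · have : h = ((h.toNat : Nat) : Int) := by omega
    rw [this, PySem.List.pyRange_zero_natCast]
    exact List.Nodup.map (fun a b hab => by exact_mod_cast hab) List.nodup_range

lemma pv_nodup_cells (h w : Int) : (pvCells h w).Nodup := by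
  rw [pvCells, List.nodup_flatMap]
  refine ⟨fun i _ => List.Nodup.map (fun a b hab => by cases hab; rfl) (pv_nodup_pyRange01 w), ?_⟩
  refine (pv_nodup_pyRange01 h).imp ?_
  intro a b hab c hc1 hc2
  simp only [List.mem_map] at hc1 hc2
  obtain ⟨m, _, rfl⟩ := hc1
  obtain ⟨m', _, h'⟩ := hc2
  exact hab (by cases h'; rfl)

lemma pv_length_cells (h w : Int) : (pvCells h w).length = (h.toNat) * (w.toNat) := by
  have hlen : ∀ b : Int, (PySem.List.pyRange 0 b 1).length = b.toNat := by
    intro b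
    rcases le_or_gt b 0 with hb | hb
    · have : PySem.List.pyRange 0 b 1 = [] := by
        by_contra hne
        obtain ⟨x, hx⟩ := List.exists_mem_of_ne_nil _ hne
        have := PySem.List.mem_pyRange_one.1 hx; omega
      rw [this]; simp; omega
    · have : b = ((b.toNat : Nat) : Int) := by omega
      rw [this, PySem.List.pyRange_zero_natCast]; simp; omega
  simp only [pvCells, List.length_flatMap, List.length_map, hlen]
  simp [List.map_const']

-- ---- abstract firing theory ----
def pvAdjB (p q : Int × Int) : Bool :=
  decide (p ≠ q ∧ p.1 - q.1 ≤ 1 ∧ q.1 - p.1 ≤ 1 ∧ p.2 - q.2 ≤ 1 ∧ q.2 - p.2 ≤ 1)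

def pvIndeg (c : Int × Int) (F : List (Int × Int)) : Int :=
  (F.countP (fun d => pvAdjB c d) : Int)

lemma pv_indeg_nonneg (c : Int × Int) (F : List (Int × Int)) : 0 ≤ pvIndeg c F := by
  simp [pvIndeg]

lemma pv_indeg_append (c : Int × Int) (F G : List (Int × Int)) :
    pvIndeg c (F ++ G) = pvIndeg c F + pvIndeg c G := by
  simp [pvIndeg, List.countP_append]

lemma pv_indeg_singleton (c d : Int × Int) :
    pvIndeg c [d] = if pvAdjB c d then 1 else 0 := by
  simp only [pvIndeg, List.countP_cons, List.countP_nil]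
  split <;> simp_all

lemma pv_indeg_mono (c : Int × Int) {F G : List (Int × Int)} (h : F.Subperm G) :
    pvIndeg c F ≤ pvIndeg c G := by
  simpa [pvIndeg] using List.Subperm.countP_le _ h

lemma pv_indeg_perm (c : Int × Int) {F G : List (Int × Int)} (h : F.Perm G) :
    pvIndeg c F = pvIndeg c G := by
  simp [pvIndeg, h.countP_eq]

def pvLegalSeq (b : (Int × Int) → Int) (F : List (Int × Int)) : Prop :=
  ∀ (k : Nat) (hk : k < F.length), 9 < b F[k] + pvIndeg F[k] (F.take k)

def pvClosedOn (b : (Int × Int) → Int) (cells F : List (Int × Int)) : Prop :=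
  ∀ c ∈ cells, c ∉ F → b c + pvIndeg c F ≤ 9

lemma pvLegalSeq_nil (b : (Int × Int) → Int) : pvLegalSeq b [] := by
  intro k hk; simp at hk

lemma pvLegalSeq_append (b : (Int × Int) → Int) (F G : List (Int × Int)) (hF : pvLegalSeq b F)
    (hG : ∀ (k : Nat) (hk : k < G.length), 9 < b G[k] + pvIndeg G[k] F) :
    pvLegalSeq b (F ++ G) := by
  intro k hk
  rcases lt_or_ge k F.length with h | h
  · rw [List.getElem_append_left h, List.take_append_of_le_length (le_of_lt h)]
    exact hF k h
  · have hk' : k - F.length < G.length := by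
      simp [List.length_append] at hk; omega
    rw [List.getElem_append_right h]
    have htake : (F ++ G).take k = F ++ G.take (k - F.length) := by
      rw [List.take_append]
      congr 1
      rw [List.take_of_length_le (by omega)]
    rw [htake]
    have hmono := pv_indeg_mono (G[k - F.length]) (F.sublist_append_left (G.take (k - F.length))).subperm
    have := hG (k - F.length) hk'
    omega

lemma pvLegalSeq_congr {b b' : (Int × Int) → Int} {F : List (Int × Int)}
    (h : ∀ c ∈ F, b c = b' c) (hF : pvLegalSeq b F) : pvLegalSeq b' F := by
  intro k hk
  rw [← h _ (F.getElem_mem hk)]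
  exact hF k hk

lemma pv_subset_of_closed {b : (Int × Int) → Int} {cells F F' : List (Int × Int)}
    (hleg : pvLegalSeq b F) (hnd : F.Nodup) (hsub : ∀ c ∈ F, c ∈ cells)
    (hnd' : F'.Nodup) (hcl : pvClosedOn b cells F') : ∀ c ∈ F, c ∈ F' := by
  have main : ∀ k : Nat, ∀ c ∈ F.take k, c ∈ F' := by
    intro k
    induction k with
    | zero => simp
    | succ k ih =>
      rcases lt_or_ge k F.length with hk | hk
      · intro c hc
        rw [List.take_succ, List.getElem?_eq_getElem hk] at hc
        simp only [List.mem_append, Option.toList_some, List.mem_singleton] at hc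
        rcases hc with hc | rfl
        · exact ih c hc
        · by_contra hcF'
          have h1 := hcl (F[k]) (hsub _ (F.getElem_mem hk)) hcF'
          have h2 := hleg k hk
          have h3 : pvIndeg (F[k]) (F.take k) ≤ pvIndeg (F[k]) F' := by
            apply pv_indeg_mono
            apply List.subperm_of_subset ((hnd.sublist (F.take_sublist k)) )
            intro a ha; exact ih a ha
          omega
      · intro c hc
        apply ih c
        rw [List.take_of_length_le (by omega)] at hc ⊢
        exact hc
  intro c hc
  exact main F.length c (by rw [List.take_length]; exact hc)

lemma pv_perm_of_legal_closed {b : (Int × Int) → Int} {cells F F' : List (Int × Int)}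
    (h1 : pvLegalSeq b F) (n1 : F.Nodup) (s1 : ∀ c ∈ F, c ∈ cells) (c1 : pvClosedOn b cells F)
    (h2 : pvLegalSeq b F') (n2 : F'.Nodup) (s2 : ∀ c ∈ F', c ∈ cells) (c2 : pvClosedOn b cells F') :
    F.Perm F' := by
  rw [List.perm_ext_iff_of_nodup n1 n2]
  intro a
  exact ⟨fun ha => pv_subset_of_closed h1 n1 s1 n2 c2 a ha,
         fun ha => pv_subset_of_closed h2 n2 s2 n1 c1 a ha⟩

lemma pv_countP_mem_eq_length {cells F : List (Int × Int)} (hc : cells.Nodup) (hF : F.Nodup)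
    (hsub : ∀ c ∈ F, c ∈ cells) : cells.countP (fun c => decide (c ∈ F)) = F.length := by
  rw [List.countP_eq_length_filter]
  have hperm : (cells.filter (fun c => decide (c ∈ F))).Perm F := by
    rw [List.perm_ext_iff_of_nodup (hc.filter _) hF]
    intro a
    simp only [List.mem_filter, decide_eq_true_eq]
    exact ⟨fun h => h.2, fun h => ⟨hsub a h, h⟩⟩
  exact hperm.length_eq

lemma pv_countP_split {α : Type} (l : List α) (p q r : α → Bool)
    (h : ∀ a ∈ l, (p a = true ↔ (q a = true ∨ r a = true)) ∧ ¬(q a = true ∧ r a = true)) :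
    l.countP p = l.countP q + l.countP r := by
  induction l with
  | nil => simp
  | cons x t ih =>
    have hx := h x (List.mem_cons_self)
    have ht := ih (fun a ha => h a (List.mem_cons_of_mem _ ha))
    simp only [List.countP_cons]
    by_cases hq : q x = true <;> by_cases hr : r x = true <;>
      by_cases hp : p x = true <;> simp_all <;> omega


-- ---- A-side: dict state representation ----
def pvRep (d : PySem.Dict (Int × Int) Int) (cells : List (Int × Int))
    (f : (Int × Int) → Int) : Prop :=
  d.keys = cells ∧ ∀ c ∈ cells, d.getD c 0 = f c

lemma pv_rep_congr {d : PySem.Dict (Int × Int) Int} {cells : List (Int × Int)}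
    {f g : (Int × Int) → Int} (hr : pvRep d cells f) (h : ∀ c ∈ cells, f c = g c) :
    pvRep d cells g :=
  ⟨hr.1, fun c hc => by rw [hr.2 c hc, h c hc]⟩

lemma pv_rep_items {d : PySem.Dict (Int × Int) Int} {cells : List (Int × Int)}
    {f : (Int × Int) → Int} (hr : pvRep d cells f) (hc : cells.Nodup) :
    d.items = cells.map (fun c => (c, f c)) := by
  have h := PySem.Dict.items_eq_map_keys d (by rw [hr.1]; exact hc) 0
  rw [hr.1] at h
  rw [h]
  exact List.map_congr_left (fun c hc' => by rw [hr.2 c hc'])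

lemma pv_rep_modify {d : PySem.Dict (Int × Int) Int} {cells : List (Int × Int)}
    {f : (Int × Int) → Int} (hr : pvRep d cells f) {k : Int × Int} (hk : k ∈ cells)
    (g : Int → Int) :
    pvRep (d.modify k 0 g) cells (fun c => if c = k then g (f k) else f c) := by
  refine ⟨?_, ?_⟩
  · rw [PySem.Dict.keys_modify, PySem.Dict.keys_insert_of_contains, hr.1]
    rw [PySem.Dict.contains_iff_mem_keys, hr.1]
    exact hk
  · intro c hc
    rw [PySem.Dict.getD_modify]
    by_cases hck : c = k
    · simp [hck, hr.2 k hk]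
    · simp [hck, hr.2 c hc]

lemma pv_ofList_items {ν : Type} (ps : List ((Int × Int) × ν)) (h : (ps.map Prod.fst).Nodup) :
    (PySem.Dict.ofList ps).items = ps := by
  have hfresh : ∀ a ∈ ps, (PySem.Dict.empty : PySem.Dict (Int × Int) ν).contains a.1 = false := by
    intro a _; exact PySem.Dict.contains_empty _
  have := PySem.Dict.items_foldl_insert_fresh ps Prod.fst Prod.snd PySem.Dict.empty hfresh h
  have hemp : (PySem.Dict.empty : PySem.Dict (Int × Int) ν).items = [] := rfl
  simpa [PySem.Dict.ofList, PySem.Dict.update, hemp] using this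

-- ---- A-side: the inner 'for adj in adjacents[flashed_loc]' fold ----
def pvStepFn (s : PySem.Dict (Int × Int) Int × List (Int × Int)) (adj : Int × Int) :
    PySem.Dict (Int × Int) Int × List (Int × Int) :=
  if s.1.getD adj 0 ≤ 9 then
    let v' := s.1.modify adj 0 (· + 1)
    if 9 < v'.getD adj 0 then (v', s.2 ++ [adj]) else (v', s.2)
  else s

lemma pv_fold_spec {cells : List (Int × Int)} (hcnd : cells.Nodup) (bF : (Int × Int) → Int) :
    ∀ (rest P : List (Int × Int)) (d : PySem.Dict (Int × Int) Int) (st0 : List (Int × Int)),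
    (P ++ rest).Nodup → (∀ q ∈ rest, q ∈ cells) →
    pvRep d cells (fun c => min (bF c + (if c ∈ P then 1 else 0)) 10) →
    (List.foldl pvStepFn (d, st0) rest).2 = st0 ++ rest.filter (fun q => decide (bF q = 9)) ∧
    pvRep (List.foldl pvStepFn (d, st0) rest).1 cells
      (fun c => min (bF c + (if c ∈ P ++ rest then 1 else 0)) 10) := by
  intro rest
  induction rest with
  | nil =>
    intro P d st0 _ _ hrep
    constructor
    · simp
    · simpa using hrep
  | cons adj rest ih =>
    intro P d st0 hnd hsub hrep
    have hadjc : adj ∈ cells := hsub adj List.mem_cons_self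
    have hadjP : adj ∉ P := by
      intro hmem
      exact (List.nodup_append.1 hnd).2.2 adj hmem adj List.mem_cons_self rfl
    have hget : d.getD adj 0 = min (bF adj) 10 := by
      rw [hrep.2 adj hadjc]; simp [hadjP]
    rw [List.foldl_cons]
    by_cases hle : bF adj ≤ 9
    · have hcond : d.getD adj 0 ≤ 9 := by rw [hget]; omega
      have hrep' := pv_rep_modify hrep hadjc (· + 1)
      have hget' : (d.modify adj 0 (· + 1)).getD adj 0 = bF adj + 1 := by
        rw [hrep'.2 adj hadjc]; simp [hadjP]; omega
      have hrep'' : pvRep (d.modify adj 0 (· + 1)) cells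
          (fun c => min (bF c + (if c ∈ P ++ [adj] then 1 else 0)) 10) := by
        refine pv_rep_congr hrep' (fun c hc => ?_)
        by_cases hca : c = adj
        · subst hca; simp [hadjP]; omega
        · simp [hca, List.mem_append]
      have hnd' : ((P ++ [adj]) ++ rest).Nodup := by
        rw [List.append_assoc, List.singleton_append]; exact hnd
      have hsub' : ∀ q ∈ rest, q ∈ cells := fun q hq => hsub q (List.mem_cons_of_mem _ hq)
      by_cases hnine : bF adj = 9
      · have : pvStepFn (d, st0) adj = (d.modify adj 0 (· + 1), st0 ++ [adj]) := by
          simp [pvStepFn, hcond, hget']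
          omega
        rw [this]
        obtain ⟨h1, h2⟩ := ih (P ++ [adj]) _ _ hnd' hsub' hrep''
        constructor
        · rw [h1]; simp [List.filter_cons, hnine]
        · simpa only [List.append_assoc, List.singleton_append] using h2
      · have : pvStepFn (d, st0) adj = (d.modify adj 0 (· + 1), st0) := by
          simp [pvStepFn, hcond, hget']
          omega
        rw [this]
        obtain ⟨h1, h2⟩ := ih (P ++ [adj]) _ _ hnd' hsub' hrep''
        constructor
        · rw [h1]; simp [List.filter_cons, hnine]
        · simpa only [List.append_assoc, List.singleton_append] using h2
    · have hcond : ¬ d.getD adj 0 ≤ 9 := by rw [hget]; omega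
      have : pvStepFn (d, st0) adj = (d, st0) := by simp [pvStepFn, hcond]
      rw [this]
      have hrep'' : pvRep d cells
          (fun c => min (bF c + (if c ∈ P ++ [adj] then 1 else 0)) 10) := by
        refine pv_rep_congr hrep (fun c hc => ?_)
        by_cases hca : c = adj
        · subst hca; simp [hadjP]; omega
        · simp [hca, List.mem_append]
      have hnd' : ((P ++ [adj]) ++ rest).Nodup := by
        rw [List.append_assoc, List.singleton_append]; exact hnd
      obtain ⟨h1, h2⟩ := ih (P ++ [adj]) d st0 hnd'
        (fun q hq => hsub q (List.mem_cons_of_mem _ hq)) hrep''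
      constructor
      · rw [h1]; have : ¬ (bF adj = 9) := by omega
        simp [List.filter_cons, this]
      · simpa only [List.append_assoc, List.singleton_append] using h2


-- ---- A-side: cascade invariant and correctness ----
structure PvInv (cells : List (Int × Int)) (b : (Int × Int) → Int)
    (F st : List (Int × Int)) (d : PySem.Dict (Int × Int) Int) : Prop where
  rep : pvRep d cells (fun c => min (b c + pvIndeg c F) 10)
  ndF : F.Nodup
  ndst : st.Nodup
  Fsub : ∀ c ∈ F, c ∈ cells
  stsub : ∀ c ∈ st, c ∈ cells
  disj : ∀ c ∈ F, c ∉ st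
  hot : ∀ c ∈ cells, (9 < b c + pvIndeg c F ↔ c ∈ F ∨ c ∈ st)
  legal : pvLegalSeq b F

def pvADGood (AD : PySem.Dict (Int × Int) (PySem.Set (Int × Int)))
    (cells : List (Int × Int)) : Prop :=
  ∀ c ∈ cells, (AD.getD c []).Nodup ∧ ∀ q, q ∈ AD.getD c [] ↔ (q ∈ cells ∧ pvAdjB q c = true)

lemma pv_cascade_spec {AD : PySem.Dict (Int × Int) (PySem.Set (Int × Int))}
    {cells : List (Int × Int)} {b : (Int × Int) → Int}
    (hAD : pvADGood AD cells) (hcnd : cells.Nodup) :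
    ∀ (fuel : Nat) (F st : List (Int × Int)) (d : PySem.Dict (Int × Int) Int),
    PvInv cells b F st d →
    st.length + cells.countP (fun c => decide (b c + pvIndeg c F ≤ 9)) ≤ fuel →
    ∃ F', PvInv cells b F' [] (pvCascade AD fuel d st) := by
  intro fuel
  induction fuel with
  | zero =>
    intro F st d hInv hfuel
    have hst : st = [] := by
      cases st with
      | nil => rfl
      | cons a t => simp at hfuel
    subst hst
    exact ⟨F, by simpa [pvCascade] using hInv⟩
  | succ fuel ih =>
    intro F st d hInv hfuel
    cases hlast : st.getLast? with
    | none =>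
      have hst : st = [] := List.getLast?_eq_none_iff.1 hlast
      subst hst
      exact ⟨F, by simpa [pvCascade] using hInv⟩
    | some c =>
      obtain ⟨st', rfl⟩ := List.getLast?_eq_some_iff.1 hlast
      have hcin : c ∈ cells := hInv.stsub c (by simp)
      have hcst : c ∈ st' ++ [c] := by simp
      have hLnd := (hAD c hcin).1
      have hLmem := (hAD c hcin).2
      have hchot : 9 < b c + pvIndeg c F := (hInv.hot c hcin).2 (Or.inr hcst)
      have hstnd : st'.Nodup := (List.nodup_append.1 hInv.ndst).1
      have hcst' : c ∉ st' := by
        intro hmem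
        exact (List.nodup_append.1 hInv.ndst).2.2 c hmem c (by simp) rfl
      have hcF : c ∉ F := fun hcF => hInv.disj c hcF hcst
      -- the inner fold
      have hrep0 : pvRep d cells
          (fun q => min ((b q + pvIndeg q F) + (if q ∈ ([] : List (Int × Int)) then 1 else 0)) 10) := by
        refine pv_rep_congr hInv.rep (fun q _ => by simp)
      obtain ⟨h1, h2⟩ := pv_fold_spec hcnd (fun q => b q + pvIndeg q F) (AD.getD c []) [] d st'
        (by simpa using hLnd) (fun q hq => ((hLmem q).1 hq).1) hrep0
      set r := List.foldl pvStepFn (d, st') (AD.getD c []) with hr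
      set newly := (AD.getD c []).filter (fun q => decide (b q + pvIndeg q F = 9)) with hnewly
      have hnewmem : ∀ q, q ∈ newly ↔ (q ∈ cells ∧ pvAdjB q c = true ∧ b q + pvIndeg q F = 9) := by
        intro q
        simp only [hnewly, List.mem_filter, hLmem q, decide_eq_true_eq]
        tauto
      have hnewnd : newly.Nodup := hLnd.filter _
      have hind : ∀ q, pvIndeg q (F ++ [c]) = pvIndeg q F + (if pvAdjB q c then 1 else 0) := by
        intro q; rw [pv_indeg_append, pv_indeg_singleton]
      -- rebuilt invariant
      have rep2 : pvRep r.1 cells (fun q => min (b q + pvIndeg q (F ++ [c])) 10) := by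
        refine pv_rep_congr h2 (fun q hq => ?_)
        by_cases hA : pvAdjB q c = true
        · have hqL : q ∈ AD.getD c [] := (hLmem q).2 ⟨hq, hA⟩
          rw [hind q]; simp [hqL, hA]; omega
        · have hqL : q ∉ AD.getD c [] := fun hmem => hA ((hLmem q).1 hmem).2
          rw [hind q]; simp [hqL, hA]
      have ndF2 : (F ++ [c]).Nodup := by
        refine List.nodup_append.2 ⟨hInv.ndF, List.nodup_singleton _, ?_⟩
        rintro a ha bb hbb heq
        simp only [List.mem_singleton] at hbb
        subst hbb
        exact hcF (heq ▸ ha)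
      have legal2 : pvLegalSeq b (F ++ [c]) := by
        refine pvLegalSeq_append b F [c] hInv.legal ?_
        intro k hk
        have : k = 0 := by simpa using hk
        subst this
        simpa using hchot
      have Fsub2 : ∀ q ∈ F ++ [c], q ∈ cells := by
        intro q hq
        rcases List.mem_append.1 hq with h | h
        · exact hInv.Fsub q h
        · simp at h; subst h; exact hcin
      have stsub2 : ∀ q ∈ st' ++ newly, q ∈ cells := by
        intro q hq
        rcases List.mem_append.1 hq with h | h
        · exact hInv.stsub q (by simp [h])
        · exact ((hnewmem q).1 h).1
      have hnewnothot : ∀ q ∈ newly, ¬ (9 < b q + pvIndeg q F) := by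
        intro q hq
        have := ((hnewmem q).1 hq).2.2
        omega
      have ndst2 : (st' ++ newly).Nodup := by
        rw [List.nodup_append]
        refine ⟨hstnd, hnewnd, ?_⟩
        intro a ha a' ha' heq
        subst heq
        have hhot : 9 < b a + pvIndeg a F :=
          (hInv.hot a (hInv.stsub a (by simp [ha]))).2 (Or.inr (by simp [ha]))
        exact hnewnothot a ha' hhot
      have disj2 : ∀ q ∈ F ++ [c], q ∉ st' ++ newly := by
        intro q hq hmem
        have hqhot : 9 < b q + pvIndeg q F := by
          rcases List.mem_append.1 hq with h | h
          · exact (hInv.hot q (hInv.Fsub q h)).2 (Or.inl h)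
          · simp at h; subst h; exact hchot
        rcases List.mem_append.1 hmem with h | h
        · rcases List.mem_append.1 hq with h' | h'
          · exact hInv.disj q h' (by simp [h])
          · simp at h'; subst h'; exact hcst' h
        · exact hnewnothot q h hqhot
      have hot2 : ∀ q ∈ cells, (9 < b q + pvIndeg q (F ++ [c]) ↔ q ∈ F ++ [c] ∨ q ∈ st' ++ newly) := by
        intro q hq
        have hold := hInv.hot q hq
        have hnm := hnewmem q
        simp only [List.mem_append, List.mem_singleton] at hold ⊢
        rw [hind q]
        by_cases hA : pvAdjB q c = true
        · rw [if_pos hA]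
          constructor
          · intro hlt
            by_cases holdhot : 9 < b q + pvIndeg q F
            · rcases hold.1 holdhot with h | h | h
              · exact Or.inl (Or.inl h)
              · exact Or.inr (Or.inl h)
              · exact Or.inl (Or.inr h)
            · exact Or.inr (Or.inr (hnm.2 ⟨hq, hA, by omega⟩))
          · rintro ((h | h) | (h | h))
            · have := hold.2 (Or.inl h); omega
            · subst h; omega
            · have := hold.2 (Or.inr (Or.inl h)); omega
            · have := (hnm.1 h).2.2; omega
        · rw [if_neg hA]
          rw [add_zero, hold]
          constructor
          · rintro (h | h | h)
            · exact Or.inl (Or.inl h)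
            · exact Or.inr (Or.inl h)
            · exact Or.inl (Or.inr h)
          · rintro ((h | h) | (h | h))
            · exact Or.inl h
            · exact Or.inr (Or.inr h)
            · exact Or.inr (Or.inl h)
            · exact absurd (hnm.1 h).2.1 hA
      have hInv2 : PvInv cells b (F ++ [c]) (st' ++ newly) r.1 :=
        ⟨rep2, ndF2, ndst2, Fsub2, stsub2, disj2, hot2, legal2⟩
      -- fuel accounting
      have hcsplit : cells.countP (fun q => decide (b q + pvIndeg q F ≤ 9)) =
          cells.countP (fun q => decide (b q + pvIndeg q (F ++ [c]) ≤ 9)) +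
          cells.countP (fun q => decide (q ∈ newly)) := by
        refine pv_countP_split cells _ _ _ (fun a ha => ?_)
        have hnm := hnewmem a
        simp only [decide_eq_true_eq]
        rw [hind a]
        by_cases hA : pvAdjB a c = true
        · rw [if_pos hA]
          constructor
          · constructor
            · intro h
              by_cases h9 : b a + pvIndeg a F = 9
              · exact Or.inr (hnm.2 ⟨ha, hA, h9⟩)
              · exact Or.inl (by omega)
            · rintro (h | h)
              · omega
              · have := (hnm.1 h).2.2; omega
          · rintro ⟨h, hmem⟩
            have := (hnm.1 hmem).2.2
            omega
        · rw [if_neg hA, add_zero]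
          constructor
          · constructor
            · exact fun h => Or.inl h
            · rintro (h | h)
              · exact h
              · exact absurd (hnm.1 h).2.1 hA
          · rintro ⟨_, hmem⟩
            exact absurd (hnm.1 hmem).2.1 hA
      have hnewlen : cells.countP (fun q => decide (q ∈ newly)) = newly.length :=
        pv_countP_mem_eq_length hcnd hnewnd (fun q hq => ((hnewmem q).1 hq).1)
      have hfuel2 : (st' ++ newly).length +
          cells.countP (fun q => decide (b q + pvIndeg q (F ++ [c]) ≤ 9)) ≤ fuel := by
        have hlen : (st' ++ [c]).length = st'.length + 1 := by simp
        have hlen2 : (st' ++ newly).length = st'.length + newly.length := by simp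
        omega
      obtain ⟨F', hF'⟩ := ih (F ++ [c]) (st' ++ newly) r.1 hInv2 hfuel2
      refine ⟨F', ?_⟩
      have hred : pvCascade AD (fuel + 1) d (st' ++ [c]) = pvCascade AD fuel r.1 r.2 := by
        simp only [pvCascade, List.getLast?_concat, List.dropLast_concat]
        rfl
      rw [hred, h1]
      exact hF'

-- ---- A-side: one full step of the outer loop ----
lemma pv_stepA {AD : PySem.Dict (Int × Int) (PySem.Set (Int × Int))} {cells : List (Int × Int)}
    (hAD : pvADGood AD cells) (hcnd : cells.Nodup)
    {d : PySem.Dict (Int × Int) Int} {v : (Int × Int) → Int} (hrep : pvRep d cells v)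
    (hv : ∀ c ∈ cells, 0 ≤ v c ∧ v c ≤ 9)
    {d1 : PySem.Dict (Int × Int) Int} {fl : List (Int × Int)} {d2 : PySem.Dict (Int × Int) Int}
    (hd1 : d1 = PySem.Dict.ofList (d.items.map (fun p => (p.1, p.2 + 1))))
    (hfl : fl = (d1.items.filter (fun p => decide (9 < p.2))).map (fun p => p.1))
    (hd2 : d2 = pvCascade AD (d1.size + fl.length) d1 fl) :
    ∃ F', F'.Nodup ∧ (∀ c ∈ F', c ∈ cells) ∧
      pvLegalSeq (fun c => v c + 1) F' ∧ pvClosedOn (fun c => v c + 1) cells F' ∧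
      ((d2.values.filter (fun x => decide (9 < x))).length : Int) = (F'.length : Int) ∧
      pvRep (PySem.Dict.ofList (d2.items.map (fun p => (p.1, if p.2 ≤ 9 then p.2 else 0)))) cells
        (fun c => if c ∈ F' then 0 else v c + 1 + pvIndeg c F') := by
  have hitems : d.items = cells.map (fun c => (c, v c)) := pv_rep_items hrep hcnd
  have hd1items : d1.items = cells.map (fun c => (c, v c + 1)) := by
    rw [hd1, hitems, List.map_map]
    rw [pv_ofList_items]
    · rfl
    · simp only [List.map_map]
      have : (Prod.fst ∘ (fun p => (p.1, p.2 + 1)) ∘ fun c => (c, v c)) = @id (Int × Int) := rfl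
      rw [this, List.map_id]
      exact hcnd
  have hd1keys : d1.keys = cells := by
    show d1.items.map Prod.fst = cells
    rw [hd1items, List.map_map]
    exact List.map_id cells
  have hd1rep : pvRep d1 cells (fun c => v c + 1) := by
    refine ⟨hd1keys, fun c hc => ?_⟩
    refine PySem.Dict.getD_of_mem_items d1 ?_ (by rw [hd1keys]; exact hcnd) 0
    rw [hd1items]
    exact List.mem_map.2 ⟨c, hc, rfl⟩
  have hflval : fl = cells.filter (fun c => decide (9 < v c + 1)) := by
    rw [hfl, hd1items, List.filter_map, List.map_map]
    have : ((fun p : (Int × Int) × Int => p.1) ∘ fun c => (c, v c + 1)) = @id (Int × Int) := rfl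
    rw [this, List.map_id]
    rfl
  have hflmem : ∀ c, c ∈ fl ↔ (c ∈ cells ∧ 9 < v c + 1) := by
    intro c
    rw [hflval]
    simp [List.mem_filter]
  have hflnd : fl.Nodup := by rw [hflval]; exact hcnd.filter _
  have hInv0 : PvInv cells (fun c => v c + 1) [] fl d1 := by
    refine ⟨?_, List.nodup_nil, hflnd, by simp, fun c hc => (hflmem c).1 hc |>.1, by simp, ?_, pvLegalSeq_nil _⟩
    · refine pv_rep_congr hd1rep (fun c hc => ?_)
      have : pvIndeg c [] = 0 := rfl
      rw [this, add_zero]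
      have := (hv c hc).2
      omega
    · intro c hc
      have : pvIndeg c [] = 0 := rfl
      rw [this, add_zero]
      simp only [List.not_mem_nil, false_or]
      rw [hflmem c]
      tauto
  have hfuel : fl.length + cells.countP (fun c => decide ((fun c => v c + 1) c + pvIndeg c [] ≤ 9)) ≤ d1.size + fl.length := by
    have h1 : d1.size = cells.length := by
      show d1.items.length = cells.length
      rw [hd1items, List.length_map]
    have h2 := List.countP_le_length (l := cells)
      (p := fun c => decide ((fun c => v c + 1) c + pvIndeg c [] ≤ 9))
    omega
  obtain ⟨F', hF'⟩ := pv_cascade_spec hAD hcnd (d1.size + fl.length) [] fl d1 hInv0 hfuel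
  rw [← hd2] at hF'
  have hclosed : pvClosedOn (fun c => v c + 1) cells F' := by
    intro c hc hcF
    have hhot : 9 < v c + 1 + pvIndeg c F' ↔ c ∈ F' ∨ c ∈ ([] : List (Int × Int)) := hF'.hot c hc
    simp only [List.not_mem_nil, or_false] at hhot
    show v c + 1 + pvIndeg c F' ≤ 9
    by_contra hlt
    exact hcF (hhot.1 (by omega))
  have hhotiff : ∀ c ∈ cells, (9 < v c + 1 + pvIndeg c F' ↔ c ∈ F') := by
    intro c hc
    have := hF'.hot c hc
    simpa using this
  have hd2items : d2.items = cells.map (fun c => (c, min (v c + 1 + pvIndeg c F') 10)) :=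
    pv_rep_items hF'.rep hcnd
  refine ⟨F', hF'.ndF, hF'.Fsub, hF'.legal, hclosed, ?_, ?_⟩
  · have hvals : d2.values = cells.map (fun c => min (v c + 1 + pvIndeg c F') 10) := by
      show d2.items.map Prod.snd = _
      rw [hd2items, List.map_map]
      rfl
    rw [hvals, List.filter_map, List.length_map, List.countP_eq_length_filter.symm]
    have : cells.countP ((fun x => decide (9 < x)) ∘ fun c => min (v c + 1 + pvIndeg c F') 10) =
        cells.countP (fun c => decide (c ∈ F')) := by
      refine List.countP_congr (fun c hc => ?_)
      simp only [Function.comp_apply, decide_eq_true_eq]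
      rw [← hhotiff c hc]
      omega
    rw [this, pv_countP_mem_eq_length hcnd hF'.ndF hF'.Fsub]
  · have hd3items : (PySem.Dict.ofList (d2.items.map (fun p => (p.1, if p.2 ≤ 9 then p.2 else 0)))).items
        = cells.map (fun c => (c, if min (v c + 1 + pvIndeg c F') 10 ≤ 9 then min (v c + 1 + pvIndeg c F') 10 else 0)) := by
      rw [hd2items, List.map_map]
      rw [pv_ofList_items]
      · rfl
      · simp only [List.map_map]
        have : (Prod.fst ∘ ((fun p : (Int × Int) × Int => (p.1, if p.2 ≤ 9 then p.2 else 0)) ∘ fun c => (c, min (v c + 1 + pvIndeg c F') 10))) = @id (Int × Int) := rfl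
        rw [this, List.map_id]
        exact hcnd
    have hd3keys : (PySem.Dict.ofList (d2.items.map (fun p => (p.1, if p.2 ≤ 9 then p.2 else 0)))).keys = cells := by
      show List.map Prod.fst _ = cells
      rw [hd3items, List.map_map]
      exact List.map_id cells
    refine ⟨hd3keys, fun c hc => ?_⟩
    have hmem : (c, if c ∈ F' then 0 else v c + 1 + pvIndeg c F') ∈
        (PySem.Dict.ofList (d2.items.map (fun p => (p.1, if p.2 ≤ 9 then p.2 else 0)))).items := by
      rw [hd3items]
      refine List.mem_map.2 ⟨c, hc, ?_⟩
      congr 1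
      by_cases hcF : c ∈ F'
      · have h10 : 9 < v c + 1 + pvIndeg c F' := (hhotiff c hc).2 hcF
        simp only [hcF, if_true]
        have hm : ¬ (min (v c + 1 + pvIndeg c F') 10 ≤ 9) := by omega
        rw [if_neg hm]
      · have h9 : v c + 1 + pvIndeg c F' ≤ 9 := hclosed c hc hcF
        simp only [hcF, if_false]
        have hm : min (v c + 1 + pvIndeg c F') 10 ≤ 9 := by omega
        rw [if_pos hm]
        omega
    exact PySem.Dict.getD_of_mem_items _ hmem (by rw [hd3keys]; exact hcnd) 0

-- ---- building the initial dicts ----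
lemma pv_enumerate_length {α : Type} : ∀ (xs : List α) (s : Int),
    (PySem.List.enumerate xs s).length = xs.length := by
  intro xs
  induction xs with
  | nil => intro s; rfl
  | cons x t ih =>
    intro s
    have h1 : PySem.List.enumerate (x :: t) s = (s, x) :: PySem.List.enumerate t (s + 1) := rfl
    rw [h1, List.length_cons, List.length_cons, ih (s + 1)]

lemma pv_enumerate_getElem {α : Type} : ∀ (xs : List α) (s : Int) (k : Nat) (hk : k < xs.length),
    (PySem.List.enumerate xs s)[k]'(by rw [pv_enumerate_length]; exact hk)
      = (s + (k : Int), xs[k]) := by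
  intro xs
  induction xs with
  | nil => intro s k hk; simp at hk
  | cons x t ih =>
    intro s k hk
    have h1 : PySem.List.enumerate (x :: t) s = (s, x) :: PySem.List.enumerate t (s + 1) := rfl
    cases k with
    | zero => simp [h1]
    | succ k =>
      have hk' : k < t.length := by simpa using hk
      have := ih (s + 1) k hk'
      simp only [h1, List.getElem_cons_succ, this, List.getElem_cons_succ]
      congr 1
      push_cast
      ring

lemma pv_pyRange01_length (b : Int) : (PySem.List.pyRange 0 b 1).length = b.toNat := by
  rcases le_or_gt b 0 with hb | hb
  · have : PySem.List.pyRange 0 b 1 = [] := by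
      by_contra hne
      obtain ⟨x, hx⟩ := List.exists_mem_of_ne_nil _ hne
      have := PySem.List.mem_pyRange_one.1 hx; omega
    rw [this]; simp; omega
  · have : b = ((b.toNat : Nat) : Int) := by omega
    rw [this, PySem.List.pyRange_zero_natCast]; simp; omega

lemma pv_pyRange01_getElem (b : Int) (k : Nat) (hk : k < b.toNat) :
    (PySem.List.pyRange 0 b 1)[k]'(by rw [pv_pyRange01_length]; exact hk) = (k : Int) := by
  have hb : b = ((b.toNat : Nat) : Int) := by omega
  have h2 : PySem.List.pyRange 0 b 1 = List.map (fun (k : Nat) => (k : Int)) (List.range b.toNat) := by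
    conv_lhs => rw [hb]
    exact PySem.List.pyRange_zero_natCast b.toNat
  rw [List.getElem_of_eq h2, List.getElem_map, List.getElem_range]

lemma pv_char_row_eq {ν : Type} (g : Int → Int → Char → ν) (W : Nat) (i : Int) (line : String)
    (hW : line.toList.length = W) :
    (PySem.List.enumerate line.toList 0).map (fun jc => ((i, jc.1), g i jc.1 jc.2))
    = (PySem.List.pyRange 0 (W : Int) 1).map
        (fun j => ((i, j), g i j (PySem.List.pyGetD line.toList j ' '))) := by
  apply List.ext_getElem
  · rw [List.length_map, List.length_map, pv_enumerate_length, pv_pyRange01_length, hW]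
    simp
  · intro k hk1 hk2
    rw [List.length_map, pv_enumerate_length, hW] at hk1
    rw [List.getElem_map, List.getElem_map]
    rw [pv_enumerate_getElem _ _ _ (by rw [hW]; exact hk1)]
    rw [pv_pyRange01_getElem _ _ (by simpa using hk1)]
    have hgd : PySem.List.pyGetD line.toList ((k : Nat) : Int) ' '
        = line.toList[k]'(by rw [hW]; exact hk1) := by
      rw [PySem.List.pyGetD_eq_getElem _ _ (by omega) (by rw [hW]; exact_mod_cast hk1)]
      have hidx : ((k : Int)).toNat = k := by omega
      simp [hidx]
    rw [hgd]
    simp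

lemma pv_flatMap_congr {α β : Type} {l : List α} {f g : α → List β}
    (h : ∀ x ∈ l, f x = g x) : l.flatMap f = l.flatMap g := by
  induction l with
  | nil => rfl
  | cons x t ih =>
    rw [List.flatMap_cons, List.flatMap_cons, h x List.mem_cons_self,
      ih (fun a ha => h a (List.mem_cons_of_mem _ ha))]

lemma pv_rows_flat_eq {ν : Type} (g : Int → Int → Char → ν) (W : Nat) :
    ∀ (rows : List String) (s : Int), (∀ r ∈ rows, r.toList.length = W) →
    (PySem.List.enumerate rows s).flatMap (fun il =>
        (PySem.List.enumerate il.2.toList 0).map (fun jc => ((il.1, jc.1), g il.1 jc.1 jc.2)))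
    = (PySem.List.pyRange s (s + (rows.length : Int)) 1).flatMap (fun i =>
        (PySem.List.pyRange 0 (W : Int) 1).map (fun j =>
          ((i, j), g i j (PySem.List.pyGetD ((PySem.List.pyGet? rows (i - s)).getD "").toList j ' ')))) := by
  intro rows
  induction rows with
  | nil =>
    intro s _
    have hre : PySem.List.pyRange s s 1 = [] := by
      by_contra hne
      obtain ⟨x, hx⟩ := List.exists_mem_of_ne_nil _ hne
      have := PySem.List.mem_pyRange_one.1 hx; omega
    simp [PySem.List.enumerate, hre]
  | cons r rest ih =>
    intro s hlen
    have h1 : PySem.List.enumerate (r :: rest) s = (s, r) :: PySem.List.enumerate rest (s + 1) := rfl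
    have h2 : PySem.List.pyRange s (s + ((r :: rest).length : Int)) 1
        = s :: PySem.List.pyRange (s + 1) (s + ((r :: rest).length : Int)) 1 := by
      refine PySem.List.pyRange_one_cons ?_
      simp only [List.length_cons]
      push_cast
      omega
    rw [h1, h2, List.flatMap_cons, List.flatMap_cons]
    congr 1
    · have hget : PySem.List.pyGet? (r :: rest) (s - s) = some r := by
        rw [sub_self]
        rw [show (0 : Int) = ((0 : Nat) : Int) from rfl, PySem.List.pyGet?_natCast]
        rfl
      rw [hget, pv_char_row_eq g W s r (hlen r List.mem_cons_self)]
      rfl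
    · rw [ih (s + 1) (fun r' hr' => hlen r' (List.mem_cons_of_mem _ hr'))]
      have hrange : PySem.List.pyRange (s + 1) (s + 1 + (rest.length : Int)) 1
          = PySem.List.pyRange (s + 1) (s + ((r :: rest).length : Int)) 1 := by
        congr 1
        simp only [List.length_cons]
        push_cast
        ring
      rw [← hrange]
      refine pv_flatMap_congr (fun i hi => ?_)
      have hib := PySem.List.mem_pyRange_one.1 hi
      refine List.map_congr_left (fun j _ => ?_)
      have hidx : PySem.List.pyGet? (r :: rest) (i - s) = PySem.List.pyGet? rest (i - (s + 1)) := by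
        have h3 : i - s = (((i - s).toNat : Nat) : Int) := by omega
        have h4 : i - (s + 1) = (((i - (s + 1)).toNat : Nat) : Int) := by omega
        rw [h3, h4, PySem.List.pyGet?_natCast, PySem.List.pyGet?_natCast]
        have h5 : (i - s).toNat = (i - (s + 1)).toNat + 1 := by omega
        rw [h5]
        simp
      rw [hidx]

lemma pv_build_items {ν : Type} (f : Int → Int → Char → ν) :
    ∀ (l : List (Int × String)) (d : PySem.Dict (Int × Int) ν),
    (∀ il ∈ l, ∀ k : Int, d.contains (il.1, k) = false) →
    (l.map Prod.fst).Nodup →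
    (l.foldl (fun dd il => (PySem.List.enumerate il.2.toList 0).foldl
        (fun dd2 jc => dd2.insert (il.1, jc.1) (f il.1 jc.1 jc.2)) dd) d).items
      = d.items ++ l.flatMap (fun il => (PySem.List.enumerate il.2.toList 0).map
          (fun jc => ((il.1, jc.1), f il.1 jc.1 jc.2))) := by
  intro l
  induction l with
  | nil => intro d _ _; simp
  | cons il rest ih =>
    intro d hfresh hnd
    rw [List.foldl_cons]
    have hrowk : ((PySem.List.enumerate il.2.toList 0).map (fun jc => (il.1, jc.1))).Nodup := by
      have hthis : ((PySem.List.enumerate il.2.toList 0).map (fun jc => (il.1, jc.1)))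
          = (List.range il.2.toList.length).map (fun (kk : Nat) => (il.1, (0 : Int) + (kk : Int))) := by
        apply List.ext_getElem
        · rw [List.length_map, pv_enumerate_length, List.length_map, List.length_range]
        · intro k hk1 hk2
          rw [List.length_map, pv_enumerate_length] at hk1
          rw [List.getElem_map, List.getElem_map, List.getElem_range,
            pv_enumerate_getElem _ _ _ hk1]
      rw [hthis]
      refine List.Nodup.map ?_ List.nodup_range
      intro a b hab
      simp only [Prod.mk.injEq] at hab
      omega
    have hrow := PySem.Dict.items_foldl_insert_fresh (PySem.List.enumerate il.2.toList 0)
      (fun jc => (il.1, jc.1)) (fun jc => f il.1 jc.1 jc.2) d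
      (fun a _ => hfresh il List.mem_cons_self a.1) hrowk
    set d2 := (PySem.List.enumerate il.2.toList 0).foldl
      (fun dd2 jc => dd2.insert (il.1, jc.1) (f il.1 jc.1 jc.2)) d with hd2
    have hfresh2 : ∀ il' ∈ rest, ∀ k : Int, d2.contains (il'.1, k) = false := by
      intro il' hil' k
      have hkeys : d2.keys = d.keys ++ (PySem.List.enumerate il.2.toList 0).map (fun jc => (il.1, jc.1)) := by
        show d2.items.map Prod.fst = _
        rw [hrow, List.map_append, List.map_map]
        rfl
      by_contra hcon
      have hcon' : d2.contains (il'.1, k) = true := by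
        cases hc : d2.contains (il'.1, k)
        · exact absurd hc hcon
        · rfl
      have hmem := (PySem.Dict.contains_iff_mem_keys d2 _).1 hcon'
      rw [hkeys, List.mem_append] at hmem
      rcases hmem with hm | hm
      · have hff := hfresh il' (List.mem_cons_of_mem _ hil') k
        rw [← PySem.Dict.contains_iff_mem_keys] at hm
        rw [hm] at hff
        exact Bool.true_eq_false.mp hff
      · simp only [List.mem_map] at hm
        obtain ⟨jc, _, hjc⟩ := hm
        have heq : il.1 = il'.1 := by simpa using congrArg Prod.fst hjc
        have hne : il.1 ∉ rest.map Prod.fst := (List.nodup_cons.1 hnd).1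
        exact hne (heq ▸ List.mem_map.2 ⟨il', hil', rfl⟩)
    rw [ih d2 hfresh2 (List.nodup_cons.1 hnd).2, hrow]
    simp [List.append_assoc]

def pvCharAt (inputs : List String) (i j : Int) : Char :=
  PySem.List.pyGetD ((PySem.List.pyGet? inputs i).getD "").toList j ' '

def pvV0 (inputs : List String) (c : Int × Int) : Int :=
  (PySem.Int.ofChars? [pvCharAt inputs c.1 c.2]).getD 0

lemma pv_digit_bounds {ch : Char} (h1 : '0' ≤ ch) (h2 : ch ≤ '9') :
    0 ≤ (PySem.Int.ofChars? [ch]).getD 0 ∧ (PySem.Int.ofChars? [ch]).getD 0 ≤ 9 := by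
  have ha : 48 ≤ ch.toNat := by
    rw [Char.le_def, UInt32.le_iff_toNat_le] at h1
    simpa using h1
  have hb : ch.toNat ≤ 57 := by
    rw [Char.le_def, UInt32.le_iff_toNat_le] at h2
    simpa using h2
  have hc : ch = Char.ofNat ch.toNat := (Char.ofNat_toNat ch).symm
  interval_cases h : ch.toNat <;> rw [hc] <;> decide

-- ---- initial dicts of A ----
lemma pv_mem_adjList {h w i j : Int} {q : Int × Int} :
    q ∈ pvAdjList h w i j ↔ (q ∈ pvCells h w ∧ pvAdjB q (i, j) = true) := by
  constructor
  · intro hq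
    obtain ⟨a, ha, hq2⟩ := List.mem_flatMap.1 hq
    obtain ⟨b, hb, heq⟩ := List.mem_map.1 hq2
    obtain ⟨hb1, hb2⟩ := List.mem_filter.1 hb
    subst heq
    have ha' := PySem.List.mem_pyRange_one.1 ha
    have hb' := PySem.List.mem_pyRange_one.1 hb1
    simp only [decide_eq_true_eq] at hb2
    obtain ⟨h1, h2, h3, h4, h5⟩ := hb2
    refine ⟨pv_mem_cells.2 ⟨h1, h2, h3, h4⟩, ?_⟩
    simp only [pvAdjB, decide_eq_true_eq]
    refine ⟨?_, by omega, by omega, by omega, by omega⟩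
    intro hc
    rw [Prod.mk.injEq] at hc
    exact h5 hc
  · rintro ⟨hc, hadj⟩
    obtain ⟨a, b⟩ := q
    have hc' := pv_mem_cells.1 hc
    simp only [pvAdjB, decide_eq_true_eq, ne_eq, Prod.mk.injEq] at hadj
    obtain ⟨hne, h1, h2, h3, h4⟩ := hadj
    refine List.mem_flatMap.2 ⟨a, PySem.List.mem_pyRange_one.2 (by omega), ?_⟩
    refine List.mem_map.2 ⟨b, List.mem_filter.2 ⟨PySem.List.mem_pyRange_one.2 (by omega), ?_⟩, rfl⟩
    simp only [decide_eq_true_eq]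
    exact ⟨hc'.1, hc'.2.1, hc'.2.2.1, hc'.2.2.2, hne⟩

lemma pv_enumerate_fst_nodup {α : Type} (xs : List α) (s : Int) :
    ((PySem.List.enumerate xs s).map Prod.fst).Nodup := by
  have hthis : ((PySem.List.enumerate xs s).map Prod.fst)
      = (List.range xs.length).map (fun (kk : Nat) => s + (kk : Int)) := by
    apply List.ext_getElem
    · rw [List.length_map, pv_enumerate_length, List.length_map, List.length_range]
    · intro k hk1 hk2
      rw [List.length_map, pv_enumerate_length] at hk1
      rw [List.getElem_map, List.getElem_map, List.getElem_range,
        pv_enumerate_getElem _ _ _ hk1]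
  rw [hthis]
  refine List.Nodup.map ?_ List.nodup_range
  intro a b hab
  have hab' : s + (a : Int) = s + (b : Int) := hab
  omega

lemma pv_gaiv_split (hh ww : Int) :
    ∀ (l : List (Int × String)) (a : PySem.Dict (Int × Int) (PySem.Set (Int × Int)))
      (b : PySem.Dict (Int × Int) Int),
    l.foldl (fun ds iline =>
      (PySem.List.enumerate iline.2.toList 0).foldl (fun ds2 jval =>
        (ds2.1.insert (iline.1, jval.1) (PySem.Set.ofList (pvAdjList hh ww iline.1 jval.1)),
         ds2.2.insert (iline.1, jval.1) ((PySem.Int.ofChars? [jval.2]).getD 0))) ds) (a, b)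
    = (l.foldl (fun dd iline => (PySem.List.enumerate iline.2.toList 0).foldl
        (fun dd2 jc => dd2.insert (iline.1, jc.1) (PySem.Set.ofList (pvAdjList hh ww iline.1 jc.1))) dd) a,
       l.foldl (fun dd iline => (PySem.List.enumerate iline.2.toList 0).foldl
        (fun dd2 jc => dd2.insert (iline.1, jc.1) ((PySem.Int.ofChars? [jc.2]).getD 0)) dd) b) := by
  intro l
  induction l with
  | nil => intro a b; rfl
  | cons il rest ih =>
    intro a b
    rw [List.foldl_cons, List.foldl_cons, List.foldl_cons]
    beta_reduce
    rw [PySem.List.foldl_prod_mk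
      (f := fun (dd2 : PySem.Dict (Int × Int) (PySem.Set (Int × Int))) (jc : Int × Char) =>
        dd2.insert (il.1, jc.1) (PySem.Set.ofList (pvAdjList hh ww il.1 jc.1)))
      (g := fun (dd2 : PySem.Dict (Int × Int) Int) (jc : Int × Char) =>
        dd2.insert (il.1, jc.1) ((PySem.Int.ofChars? [jc.2]).getD 0))]
    exact ih _ _

lemma pv_flat_to_cells {ν : Type} (g : Int → Int → Char → ν) (inputs : List String)
    (hlen : ∀ r ∈ inputs, r.toList.length = inputs.headI.toList.length) :
    (PySem.List.enumerate inputs 0).flatMap (fun il =>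
        (PySem.List.enumerate il.2.toList 0).map (fun jc => ((il.1, jc.1), g il.1 jc.1 jc.2)))
    = (pvCells (inputs.length : Int) (inputs.headI.toList.length : Int)).map
        (fun c => (c, g c.1 c.2 (pvCharAt inputs c.1 c.2))) := by
  rw [pv_rows_flat_eq g inputs.headI.toList.length inputs 0 hlen]
  simp only [zero_add, sub_zero]
  rw [pvCells, List.map_flatMap]
  refine pv_flatMap_congr (fun i _ => ?_)
  rw [List.map_map]
  rfl

lemma pv_gaiv_spec (inputs : List String) (hne : inputs ≠ [])
    (hlen : ∀ r ∈ inputs, r.toList.length = inputs.headI.toList.length) :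
    pvADGood (get_adjacents_and_initial_values inputs).1
        (pvCells (inputs.length : Int) (inputs.headI.toList.length : Int))
    ∧ pvRep (get_adjacents_and_initial_values inputs).2
        (pvCells (inputs.length : Int) (inputs.headI.toList.length : Int)) (pvV0 inputs) := by
  have hw : PySem.Str.len ((PySem.List.pyGet? inputs 0).getD "")
      = (inputs.headI.toList.length : Int) := by
    cases inputs with
    | nil => exact absurd rfl hne
    | cons x t =>
      have : PySem.List.pyGet? (x :: t) 0 = some x := by
        rw [show (0 : Int) = ((0 : Nat) : Int) from rfl, PySem.List.pyGet?_natCast]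
        rfl
      rw [this]
      simp [PySem.Str.len_eq]
  have hcnd := pv_nodup_cells (inputs.length : Int) (inputs.headI.toList.length : Int)
  have hunf : get_adjacents_and_initial_values inputs
      = ((PySem.List.enumerate inputs 0).foldl (fun ds iline =>
          (PySem.List.enumerate iline.2.toList 0).foldl (fun ds2 jval =>
            (ds2.1.insert (iline.1, jval.1) (PySem.Set.ofList (pvAdjList (inputs.length : Int)
                (inputs.headI.toList.length : Int) iline.1 jval.1)),
             ds2.2.insert (iline.1, jval.1) ((PySem.Int.ofChars? [jval.2]).getD 0))) ds)
          (PySem.Dict.empty, PySem.Dict.empty)) := by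
    rw [get_adjacents_and_initial_values]
    rw [hw]
  rw [hunf, pv_gaiv_split]
  set cells := pvCells (inputs.length : Int) (inputs.headI.toList.length : Int) with hcells
  have hbuildA := pv_build_items
    (fun i j ch => PySem.Set.ofList (pvAdjList (inputs.length : Int) (inputs.headI.toList.length : Int) i j))
    (PySem.List.enumerate inputs 0) PySem.Dict.empty
    (fun il _ k => PySem.Dict.contains_empty _) (pv_enumerate_fst_nodup inputs 0)
  have hbuildB := pv_build_items (fun i j ch => (PySem.Int.ofChars? [ch]).getD 0)
    (PySem.List.enumerate inputs 0) PySem.Dict.empty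
    (fun il _ k => PySem.Dict.contains_empty _) (pv_enumerate_fst_nodup inputs 0)
  rw [pv_flat_to_cells (fun i j _ => PySem.Set.ofList (pvAdjList (inputs.length : Int)
    (inputs.headI.toList.length : Int) i j)) inputs hlen] at hbuildA
  rw [pv_flat_to_cells (fun _ _ ch => (PySem.Int.ofChars? [ch]).getD 0) inputs hlen] at hbuildB
  have hempA : (PySem.Dict.empty : PySem.Dict (Int × Int) (PySem.Set (Int × Int))).items = [] := rfl
  have hempB : (PySem.Dict.empty : PySem.Dict (Int × Int) Int).items = [] := rfl
  rw [hempA, List.nil_append] at hbuildA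
  rw [hempB, List.nil_append] at hbuildB
  have hkeysA : (((PySem.List.enumerate inputs 0).foldl (fun dd iline =>
      (PySem.List.enumerate iline.2.toList 0).foldl (fun dd2 jc =>
        dd2.insert (iline.1, jc.1) (PySem.Set.ofList (pvAdjList (inputs.length : Int)
          (inputs.headI.toList.length : Int) iline.1 jc.1))) dd)
      (PySem.Dict.empty : PySem.Dict (Int × Int) (PySem.Set (Int × Int))))).keys = cells := by
    show List.map Prod.fst _ = cells
    rw [hbuildA, List.map_map]
    exact List.map_id cells
  have hkeysB : (((PySem.List.enumerate inputs 0).foldl (fun dd iline =>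
      (PySem.List.enumerate iline.2.toList 0).foldl (fun dd2 jc =>
        dd2.insert (iline.1, jc.1) ((PySem.Int.ofChars? [jc.2]).getD 0)) dd)
      (PySem.Dict.empty : PySem.Dict (Int × Int) Int))).keys = cells := by
    show List.map Prod.fst _ = cells
    rw [hbuildB, List.map_map]
    exact List.map_id cells
  constructor
  · intro c hc
    have hgd : (((PySem.List.enumerate inputs 0).foldl (fun dd iline =>
        (PySem.List.enumerate iline.2.toList 0).foldl (fun dd2 jc =>
          dd2.insert (iline.1, jc.1) (PySem.Set.ofList (pvAdjList (inputs.length : Int)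
            (inputs.headI.toList.length : Int) iline.1 jc.1))) dd)
        (PySem.Dict.empty : PySem.Dict (Int × Int) (PySem.Set (Int × Int))))).getD c []
        = PySem.Set.ofList (pvAdjList (inputs.length : Int) (inputs.headI.toList.length : Int) c.1 c.2) := by
      refine PySem.Dict.getD_of_mem_items _ ?_ (by rw [hkeysA]; exact hcnd) []
      rw [hbuildA]
      exact List.mem_map.2 ⟨c, hc, rfl⟩
    rw [hgd]
    constructor
    · exact PySem.Set.nodup_ofList _
    · intro q
      rw [PySem.Set.mem_ofList, pv_mem_adjList]
  · refine ⟨hkeysB, fun c hc => ?_⟩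
    refine PySem.Dict.getD_of_mem_items _ ?_ (by rw [hkeysB]; exact hcnd) 0
    rw [hbuildB]
    exact List.mem_map.2 ⟨c, hc, rfl⟩

lemma pv_v0_bounds (inputs : List String) (hne : inputs ≠ [])
    (hlen : ∀ r ∈ inputs, r.toList.length = inputs.headI.toList.length)
    (hdig : ∀ r ∈ inputs, ∀ ch ∈ r.toList, '0' ≤ ch ∧ ch ≤ '9') :
    ∀ c ∈ pvCells (inputs.length : Int) (inputs.headI.toList.length : Int),
      0 ≤ pvV0 inputs c ∧ pvV0 inputs c ≤ 9 := by
  intro c hc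
  obtain ⟨h1, h2, h3, h4⟩ := pv_mem_cells.1 hc
  have hrow : PySem.List.pyGet? inputs c.1 = some (inputs[c.1.toNat]'(by omega)) := by
    have h0 : PySem.List.pyGet? inputs c.1 = PySem.List.pyGet? inputs ((c.1.toNat : Nat) : Int) := by
      congr 1
      omega
    rw [h0, PySem.List.pyGet?_natCast]
    exact List.getElem?_eq_getElem (by omega)
  have hrmem : inputs[c.1.toNat]'(by omega) ∈ inputs := List.getElem_mem _
  have hrl : (inputs[c.1.toNat]'(by omega)).toList.length = inputs.headI.toList.length :=
    hlen _ hrmem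
  have hch : pvCharAt inputs c.1 c.2
      = (inputs[c.1.toNat]'(by omega)).toList[c.2.toNat]'(by omega) := by
    rw [pvCharAt, hrow]
    show PySem.List.pyGetD (inputs[c.1.toNat]'(by omega)).toList c.2 ' ' = _
    rw [PySem.List.pyGetD_eq_getElem _ _ h3 (by omega)]
  have hcm : (inputs[c.1.toNat]'(by omega)).toList[c.2.toNat]'(by omega)
      ∈ (inputs[c.1.toNat]'(by omega)).toList := List.getElem_mem _
  have := hdig _ hrmem _ hcm
  rw [pvV0, hch]
  exact pv_digit_bounds this.1 this.2

-- ---- B-side ----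
def pvGridOf (h w : Int) (v : (Int × Int) → Int) : List (List Int) :=
  (PySem.List.pyRange 0 h 1).map (fun i => (PySem.List.pyRange 0 w 1).map (fun j => v (i, j)))

lemma pv_grid_lookup {h w : Int} {v : (Int × Int) → Int} {i j : Int}
    (h1 : 0 ≤ i) (h2 : i < h) (h3 : 0 ≤ j) (h4 : j < w) :
    PySem.List.pyGetD ((PySem.List.pyGet? (pvGridOf h w v) i).getD []) j 0 = v (i, j) := by
  have hrow : PySem.List.pyGet? (pvGridOf h w v) i
      = some ((PySem.List.pyRange 0 w 1).map (fun j => v (i, j))) := by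
    have h0 : PySem.List.pyGet? (pvGridOf h w v) i
        = PySem.List.pyGet? (pvGridOf h w v) ((i.toNat : Nat) : Int) := by congr 1; omega
    rw [h0, PySem.List.pyGet?_natCast, pvGridOf, List.getElem?_map]
    have hi : (PySem.List.pyRange 0 h 1)[i.toNat]? = some i := by
      rw [List.getElem?_eq_getElem (by rw [pv_pyRange01_length]; omega)]
      rw [pv_pyRange01_getElem h i.toNat (by omega)]
      congr 1
      omega
    rw [hi]
    rfl
  rw [hrow]
  show PySem.List.pyGetD ((PySem.List.pyRange 0 w 1).map (fun j => v (i, j))) j 0 = v (i, j)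
  rw [PySem.List.pyGetD_eq_getElem _ _ h3 (by rw [List.length_map, pv_pyRange01_length]; omega)]
  rw [List.getElem_map, pv_pyRange01_getElem w j.toNat (by omega)]
  have hj : ((j.toNat : Nat) : Int) = j := by omega
  rw [hj]

lemma pv_countP_mem_swap {A B : List (Int × Int)} (hA : A.Nodup) (hB : B.Nodup) :
    A.countP (fun x => decide (x ∈ B)) = B.countP (fun x => decide (x ∈ A)) := by
  rw [List.countP_eq_length_filter, List.countP_eq_length_filter]
  refine List.Perm.length_eq ?_
  rw [List.perm_ext_iff_of_nodup (hA.filter _) (hB.filter _)]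
  intro a
  simp only [List.mem_filter, decide_eq_true_eq]
  tauto

lemma pv_fn_eq_indeg (i j : Int) (S : List (Int × Int)) (hS : S.Nodup) :
    pvFiredNeighbors i j S = pvIndeg (i, j) S := by
  rw [pvFiredNeighbors]
  rw [PySem.List.sum_map_ite_one_zero (p := fun p => PySem.Set.contains S p)]
  set N := (([i - 1, i, i + 1].flatMap (fun a => [j - 1, j, j + 1].map (fun b => (a, b)))).filter
      (fun p => decide (p ≠ (i, j)))) with hN
  have hNmem : ∀ q : Int × Int, q ∈ N ↔ pvAdjB (i, j) q = true := by
    rintro ⟨a, b⟩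
    rw [hN]
    simp only [List.mem_filter, List.mem_flatMap, List.mem_map, List.mem_cons,
      List.not_mem_nil, or_false, decide_eq_true_eq, pvAdjB, ne_eq, Prod.mk.injEq]
    constructor
    · rintro ⟨⟨x, hx, y, hy, rfl, rfl⟩, hne⟩
      refine ⟨fun hc => hne ⟨hc.1.symm, hc.2.symm⟩, by omega, by omega, by omega, by omega⟩
    · rintro ⟨hne, h1, h2, h3, h4⟩
      exact ⟨⟨a, by omega, b, by omega, rfl, rfl⟩, fun hc => hne ⟨hc.1.symm, hc.2.symm⟩⟩
  have hNnd : N.Nodup := by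
    rw [hN]
    refine List.Nodup.filter _ ?_
    rw [List.nodup_flatMap]
    constructor
    · intro a _
      refine List.Nodup.map (fun x y hxy => ?_) ?_
      · have := congrArg Prod.snd hxy
        simpa using this
      · refine List.nodup_cons.2 ⟨?_, List.nodup_cons.2 ⟨?_, List.nodup_singleton _⟩⟩
        · simp only [List.mem_cons, List.not_mem_nil, or_false, List.mem_singleton]
          omega
        · simp only [List.not_mem_nil, or_false, List.mem_singleton]
          omega
    · have hnd3 : ([i - 1, i, i + 1] : List Int).Nodup := by
        refine List.nodup_cons.2 ⟨?_, List.nodup_cons.2 ⟨?_, List.nodup_singleton _⟩⟩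
        · simp only [List.mem_cons, List.not_mem_nil, or_false, List.mem_singleton]
          omega
        · simp only [List.not_mem_nil, or_false, List.mem_singleton]
          omega
      refine hnd3.imp ?_
      intro a b hab c hc1 hc2
      simp only [List.mem_map] at hc1 hc2
      obtain ⟨m, _, rfl⟩ := hc1
      obtain ⟨m', _, h'⟩ := hc2
      exact hab (by cases h'; rfl)
  have hc1 : N.countP (fun p => PySem.Set.contains S p) = N.countP (fun x => decide (x ∈ S)) := by
    refine List.countP_congr (fun x _ => ?_)
    rw [decide_eq_true_eq]
    exact PySem.Set.contains_iff S x
  have hc2 := pv_countP_mem_swap hNnd hS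
  have hc3 : S.countP (fun x => decide (x ∈ N)) = S.countP (fun d => pvAdjB (i, j) d) := by
    refine List.countP_congr (fun x _ => ?_)
    rw [decide_eq_true_eq, hNmem x]
  rw [pvIndeg]
  rw [hc1, hc2, hc3]

lemma pv_contains_false_iff {S : PySem.Set (Int × Int)} {q : Int × Int} :
    PySem.Set.contains S q = false ↔ q ∉ S := by
  constructor
  · intro h hmem
    have := (PySem.Set.contains_iff S q).2 hmem
    rw [h] at this
    exact Bool.false_ne_true this
  · intro h
    cases hc : PySem.Set.contains S q
    · rfl
    · exact absurd ((PySem.Set.contains_iff S q).1 hc) h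

lemma pv_new_mem {h w : Int} {v : (Int × Int) → Int} {S : PySem.Set (Int × Int)} (hS : S.Nodup)
    {q : Int × Int} :
    q ∈ pvNewFlashes (pvGridOf h w v) h w S ↔
      (q ∈ pvCells h w ∧ q ∉ S ∧ 9 < v q + 1 + pvIndeg q S) := by
  obtain ⟨a, b⟩ := q
  rw [pvNewFlashes]
  constructor
  · intro hq
    obtain ⟨i, hi, hq2⟩ := List.mem_flatMap.1 hq
    obtain ⟨j, hj, heq⟩ := List.mem_map.1 hq2
    obtain ⟨hj1, hj2⟩ := List.mem_filter.1 hj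
    cases heq
    have hi' := PySem.List.mem_pyRange_one.1 hi
    have hj' := PySem.List.mem_pyRange_one.1 hj1
    rw [Bool.and_eq_true, Bool.not_eq_true', decide_eq_true_eq] at hj2
    obtain ⟨hns, hgt⟩ := hj2
    rw [pv_grid_lookup hi'.1 hi'.2 hj'.1 hj'.2, pv_fn_eq_indeg _ _ _ hS] at hgt
    exact ⟨pv_mem_cells.2 ⟨hi'.1, hi'.2, hj'.1, hj'.2⟩, pv_contains_false_iff.1 hns, hgt⟩
  · rintro ⟨hc, hns, hgt⟩
    have hc' := pv_mem_cells.1 hc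
    refine List.mem_flatMap.2 ⟨a, PySem.List.mem_pyRange_one.2 ⟨hc'.1, hc'.2.1⟩, ?_⟩
    refine List.mem_map.2 ⟨b, List.mem_filter.2 ⟨PySem.List.mem_pyRange_one.2 ⟨hc'.2.2.1, hc'.2.2.2⟩, ?_⟩, rfl⟩
    rw [Bool.and_eq_true, Bool.not_eq_true', decide_eq_true_eq]
    refine ⟨pv_contains_false_iff.2 hns, ?_⟩
    rw [pv_grid_lookup hc'.1 hc'.2.1 hc'.2.2.1 hc'.2.2.2, pv_fn_eq_indeg _ _ _ hS]
    exact hgt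

lemma pv_new_nodup (grid : List (List Int)) (h w : Int) (S : PySem.Set (Int × Int)) :
    (pvNewFlashes grid h w S).Nodup := by
  rw [pvNewFlashes, List.nodup_flatMap]
  constructor
  · intro i _
    refine List.Nodup.map (fun x y hxy => ?_) ((pv_nodup_pyRange01 w).filter _)
    have := congrArg Prod.snd hxy
    simpa using this
  · refine (pv_nodup_pyRange01 h).imp ?_
    intro a b hab c hc1 hc2
    simp only [List.mem_map] at hc1 hc2
    obtain ⟨m, _, rfl⟩ := hc1
    obtain ⟨m', _, h'⟩ := hc2
    exact hab (by cases h'; rfl)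

lemma pv_saturate_spec {h w : Int} {v : (Int × Int) → Int} :
    ∀ (fuel : Nat) (S : PySem.Set (Int × Int)), S.Nodup → (∀ c ∈ S, c ∈ pvCells h w) →
    pvLegalSeq (fun c => v c + 1) S →
    ((pvCells h w).length + 1 ≤ fuel + S.length) →
    (pvSaturate (pvGridOf h w v) h w fuel S).Nodup ∧
    (∀ c ∈ pvSaturate (pvGridOf h w v) h w fuel S, c ∈ pvCells h w) ∧
    pvLegalSeq (fun c => v c + 1) (pvSaturate (pvGridOf h w v) h w fuel S) ∧
    pvClosedOn (fun c => v c + 1) (pvCells h w) (pvSaturate (pvGridOf h w v) h w fuel S) := by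
  intro fuel
  induction fuel with
  | zero =>
    intro S hnd hsub hleg hfuel
    exfalso
    have := (List.subperm_of_subset hnd hsub).length_le
    omega
  | succ fuel ih =>
    intro S hnd hsub hleg hfuel
    cases hemp : (pvNewFlashes (pvGridOf h w v) h w S).isEmpty with
    | true =>
      have hres : pvSaturate (pvGridOf h w v) h w (fuel + 1) S = S := by
        rw [pvSaturate]
        simp only [hemp, if_true]
      rw [hres]
      refine ⟨hnd, hsub, hleg, ?_⟩
      intro c hc hcS
      show v c + 1 + pvIndeg c S ≤ 9
      by_contra hlt
      have hmem : c ∈ pvNewFlashes (pvGridOf h w v) h w S :=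
        (pv_new_mem hnd).2 ⟨hc, hcS, by omega⟩
      rw [List.isEmpty_iff.1 hemp] at hmem
      exact List.not_mem_nil hmem
    | false =>
      have hmemnew : ∀ q ∈ pvNewFlashes (pvGridOf h w v) h w S,
          q ∈ pvCells h w ∧ q ∉ S ∧ 9 < v q + 1 + pvIndeg q S :=
        fun q hq => (pv_new_mem hnd).1 hq
      have hnewnd := pv_new_nodup (pvGridOf h w v) h w S
      have hupd : PySem.Set.update S (pvNewFlashes (pvGridOf h w v) h w S)
          = S ++ pvNewFlashes (pvGridOf h w v) h w S :=
        PySem.Set.update_eq_append_of_disjoint S _ hnewnd (fun x hx => (hmemnew x hx).2.1)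
      have hnd2 : (S ++ pvNewFlashes (pvGridOf h w v) h w S).Nodup := by
        rw [List.nodup_append]
        refine ⟨hnd, hnewnd, ?_⟩
        intro x hx y hy hxy
        subst hxy
        exact (hmemnew x hy).2.1 hx
      have hsub2 : ∀ c ∈ S ++ pvNewFlashes (pvGridOf h w v) h w S, c ∈ pvCells h w := by
        intro c hc
        rcases List.mem_append.1 hc with hc | hc
        · exact hsub c hc
        · exact (hmemnew c hc).1
      have hleg2 : pvLegalSeq (fun c => v c + 1) (S ++ pvNewFlashes (pvGridOf h w v) h w S) := by
        refine pvLegalSeq_append _ S _ hleg ?_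
        intro k hk
        exact (hmemnew _ (List.getElem_mem hk)).2.2
      have hnewlen : (pvNewFlashes (pvGridOf h w v) h w S).length ≠ 0 := by
        intro hc
        rw [List.length_eq_zero_iff.1 hc] at hemp
        simp at hemp
      have hres : pvSaturate (pvGridOf h w v) h w (fuel + 1) S
          = pvSaturate (pvGridOf h w v) h w fuel
              (PySem.Set.update S (pvNewFlashes (pvGridOf h w v) h w S)) := by
        rw [pvSaturate]
        simp only [hemp, Bool.false_eq_true, if_false]
      rw [hres, hupd]
      refine ih _ hnd2 hsub2 hleg2 ?_
      rw [List.length_append]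
      omega

lemma pv_grid0_eq (inputs : List String) (hne : inputs ≠ [])
    (hlen : ∀ r ∈ inputs, r.toList.length = inputs.headI.toList.length) :
    inputs.map (fun row => row.toList.map (fun c => (PySem.Int.ofChars? [c]).getD 0))
      = pvGridOf (inputs.length : Int) (inputs.headI.toList.length : Int) (pvV0 inputs) := by
  apply List.ext_getElem
  · rw [List.length_map, pvGridOf, List.length_map, pv_pyRange01_length]
    simp
  · intro k hk1 hk2
    have hk1' : k < inputs.length := by simpa using hk1
    simp only [pvGridOf]
    rw [List.getElem_map, List.getElem_map,
      pv_pyRange01_getElem _ _ (by simpa using hk1')]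
    have hrl : (inputs[k]'hk1').toList.length = inputs.headI.toList.length :=
      hlen _ (List.getElem_mem hk1')
    apply List.ext_getElem
    · simp only [List.length_map, pv_pyRange01_length]
      omega
    · intro m hm1 hm2
      have hm1' : m < (inputs[k]'hk1').toList.length := by simpa using hm1
      rw [List.getElem_map, List.getElem_map,
        pv_pyRange01_getElem _ _ (by omega)]
      rw [pvV0]
      have hch : pvCharAt inputs ((k : Nat) : Int) ((m : Nat) : Int)
          = (inputs[k]'hk1').toList[m]'hm1' := by
        rw [pvCharAt]
        have hr : PySem.List.pyGet? inputs ((k : Nat) : Int) = some (inputs[k]'hk1') := by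
          rw [PySem.List.pyGet?_natCast]
          exact List.getElem?_eq_getElem hk1'
        rw [hr]
        show PySem.List.pyGetD (inputs[k]'hk1').toList ((m : Nat) : Int) ' ' = _
        rw [PySem.List.pyGetD_eq_getElem _ _ (by omega) (by exact_mod_cast hm1')]
        have : (((m : Nat) : Int)).toNat = m := by omega
        simp [this]
      rw [hch]

lemma pv_foldl_rel {α β γ : Type} (R : α → β → Prop) (fA : α → γ → α) (fB : β → γ → β)
    (l : List γ) (a : α) (b : β) (h0 : R a b)
    (hstep : ∀ a b x, R a b → R (fA a x) (fB b x)) :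
    R (l.foldl fA a) (l.foldl fB b) := by
  induction l generalizing a b with
  | nil => exact h0
  | cons x t ih => exact ih _ _ (hstep a b x h0)

lemma pv_closed_congr {b b' : (Int × Int) → Int} {cells F : List (Int × Int)}
    (h : ∀ c ∈ cells, b c = b' c) (hc : pvClosedOn b cells F) : pvClosedOn b' cells F := by
  intro c hcc hcf
  rw [← h c hcc]
  exact hc c hcc hcf

-- ===== VERDICT (by name: the statement is the Claim_ definition above) =====
theorem get_flashes_spec : Claim_equal_get_flashes := by
  unfold Claim_equal_get_flashes
  intro inputs num _ hpre
  unfold Spec_get_flashes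
  obtain ⟨hne, hrows⟩ := hpre
  have hlen : ∀ r ∈ inputs, r.toList.length = inputs.headI.toList.length :=
    fun r hr => (hrows r hr).1
  have hdig : ∀ r ∈ inputs, ∀ ch ∈ r.toList, '0' ≤ ch ∧ ch ≤ '9' := by
    intro r hr ch hch
    have h := (hrows r hr).2
    rw [List.all_eq_true] at h
    have h2 := h ch hch
    rw [Bool.and_eq_true, decide_eq_true_eq, decide_eq_true_eq] at h2
    exact h2
  obtain ⟨hAD, hrep0⟩ := pv_gaiv_spec inputs hne hlen
  have hcnd := pv_nodup_cells (inputs.length : Int) (inputs.headI.toList.length : Int)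
  have hb0 := pv_v0_bounds inputs hne hlen hdig
  have hgrid0 := pv_grid0_eq inputs hne hlen
  have hw : PySem.Str.len ((PySem.List.pyGet? inputs 0).getD "")
      = ((inputs.headI.toList.length : Nat) : Int) := by
    cases inputs with
    | nil => exact absurd rfl hne
    | cons x t =>
      have hx : PySem.List.pyGet? (x :: t) 0 = some x := by
        rw [show (0 : Int) = ((0 : Nat) : Int) from rfl, PySem.List.pyGet?_natCast]
        rfl
      rw [hx]
      simp [PySem.Str.len_eq]
  simp only [get_flashes, get_flashes_alt, hw]
  refine (pv_foldl_rel
    (fun (sa : PySem.Dict (Int × Int) Int × Int) (sb : List (List Int) × Int) =>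
      sa.2 = sb.2 ∧ ∃ vA vB : (Int × Int) → Int,
        pvRep sa.1 (pvCells (inputs.length : Int) (inputs.headI.toList.length : Int)) vA ∧
        sb.1 = pvGridOf (inputs.length : Int) (inputs.headI.toList.length : Int) vB ∧
        ∀ c ∈ pvCells (inputs.length : Int) (inputs.headI.toList.length : Int),
          vA c = vB c ∧ 0 ≤ vA c ∧ vA c ≤ 9)
    _ _ (PySem.List.pyRange 0 num 1) _ _
    ⟨rfl, pvV0 inputs, pvV0 inputs, hrep0, hgrid0, fun c hc => ⟨rfl, (hb0 c hc).1, (hb0 c hc).2⟩⟩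
    ?_).1
  intro sa sb x hR
  obtain ⟨htot, vA, vB, hrepA, hgB, hagree⟩ := hR
  have hvab : ∀ c ∈ pvCells (inputs.length : Int) (inputs.headI.toList.length : Int),
      0 ≤ vA c ∧ vA c ≤ 9 := fun c hc => ⟨(hagree c hc).2.1, (hagree c hc).2.2⟩
  obtain ⟨F', hFnd, hFsub, hFleg, hFcl, hcount, hrepA'⟩ :=
    pv_stepA hAD hcnd hrepA hvab rfl rfl rfl
  have hfuel : (pvCells (inputs.length : Int) (inputs.headI.toList.length : Int)).length + 1 ≤
      (((inputs.length : Int) * ((inputs.headI.toList.length : Nat) : Int)).toNat + 1) +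
      (PySem.Set.empty : PySem.Set (Int × Int)).length := by
    rw [pv_length_cells]
    have h1 : (inputs.length : Int) * ((inputs.headI.toList.length : Nat) : Int)
        = ((inputs.length * inputs.headI.toList.length : Nat) : Int) := by
      push_cast
      ring
    rw [h1]
    simp only [Int.toNat_natCast]
    have h2 : List.length (PySem.Set.empty : PySem.Set (Int × Int)) = 0 := rfl
    omega
  obtain ⟨hSnd, hSsub, hSleg, hScl⟩ :=
    pv_saturate_spec (v := vB)
      ((((inputs.length : Int)) * ((inputs.headI.toList.length : Nat) : Int)).toNat + 1)
      PySem.Set.empty List.nodup_nil (by simp) (pvLegalSeq_nil _) hfuel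
  have hbeq : ∀ c ∈ pvCells (inputs.length : Int) (inputs.headI.toList.length : Int),
      vB c + 1 = vA c + 1 := by
    intro c hc
    have := (hagree c hc).1
    omega
  have hSlegA : pvLegalSeq (fun c => vA c + 1)
      (pvSaturate (pvGridOf (inputs.length : Int) (inputs.headI.toList.length : Int) vB)
        (inputs.length : Int) ((inputs.headI.toList.length : Nat) : Int)
        ((((inputs.length : Int)) * ((inputs.headI.toList.length : Nat) : Int)).toNat + 1)
        PySem.Set.empty) :=
    pvLegalSeq_congr (fun c hcS => hbeq c (hSsub c hcS)) hSleg
  have hSclA : pvClosedOn (fun c => vA c + 1)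
      (pvCells (inputs.length : Int) (inputs.headI.toList.length : Int))
      (pvSaturate (pvGridOf (inputs.length : Int) (inputs.headI.toList.length : Int) vB)
        (inputs.length : Int) ((inputs.headI.toList.length : Nat) : Int)
        ((((inputs.length : Int)) * ((inputs.headI.toList.length : Nat) : Int)).toNat + 1)
        PySem.Set.empty) :=
    pv_closed_congr hbeq hScl
  have hperm : F'.Perm
      (pvSaturate (pvGridOf (inputs.length : Int) (inputs.headI.toList.length : Int) vB)
        (inputs.length : Int) ((inputs.headI.toList.length : Nat) : Int)
        ((((inputs.length : Int)) * ((inputs.headI.toList.length : Nat) : Int)).toNat + 1)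
        PySem.Set.empty) :=
    pv_perm_of_legal_closed hFleg hFnd hFsub hFcl hSlegA hSnd hSsub hSclA
  rw [hgB]
  refine ⟨?_, (fun c => if c ∈ F' then 0 else vA c + 1 + pvIndeg c F'),
    (fun c => if PySem.Set.contains
        (pvSaturate (pvGridOf (inputs.length : Int) (inputs.headI.toList.length : Int) vB)
          (inputs.length : Int) ((inputs.headI.toList.length : Nat) : Int)
          ((((inputs.length : Int)) * ((inputs.headI.toList.length : Nat) : Int)).toNat + 1)
          PySem.Set.empty) (c.1, c.2) = true then 0
      else PySem.List.pyGetD ((PySem.List.pyGet?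
          (pvGridOf (inputs.length : Int) (inputs.headI.toList.length : Int) vB) c.1).getD []) c.2 0
        + 1 + pvFiredNeighbors c.1 c.2
          (pvSaturate (pvGridOf (inputs.length : Int) (inputs.headI.toList.length : Int) vB)
            (inputs.length : Int) ((inputs.headI.toList.length : Nat) : Int)
            ((((inputs.length : Int)) * ((inputs.headI.toList.length : Nat) : Int)).toNat + 1)
            PySem.Set.empty)),
    hrepA', rfl, ?_⟩
  · -- totals
    show sa.2 + _ = sb.2 + _
    rw [htot, hcount]
    have hlen2 : (F'.length : Int) = PySem.Set.len
        (pvSaturate (pvGridOf (inputs.length : Int) (inputs.headI.toList.length : Int) vB)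
          (inputs.length : Int) ((inputs.headI.toList.length : Nat) : Int)
          ((((inputs.length : Int)) * ((inputs.headI.toList.length : Nat) : Int)).toNat + 1)
          PySem.Set.empty) := by
      rw [PySem.Set.len]
      exact_mod_cast congrArg Nat.cast hperm.length_eq
    rw [hlen2]
  · -- agreement and bounds
    intro c hc
    obtain ⟨h1, h2, h3, h4⟩ := pv_mem_cells.1 hc
    have hlook := pv_grid_lookup (v := vB) h1 h2 h3 h4
    have hfn := pv_fn_eq_indeg c.1 c.2 _ hSnd
    have hind := pv_indeg_perm c hperm
    have hagc := hagree c hc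
    by_cases hcF : c ∈ F'
    · have hcS : c ∈ _ := hperm.mem_iff.1 hcF
      have hcon : PySem.Set.contains _ (c.1, c.2) = true :=
        (PySem.Set.contains_iff _ _).2 hcS
      refine ⟨?_, ?_, ?_⟩
      · simp only [hcF, if_true, hcon]
      · simp only [hcF, if_true]
        omega
      · simp only [hcF, if_true]
        omega
    · have hcS : c ∉ pvSaturate (pvGridOf (inputs.length : Int) (inputs.headI.toList.length : Int) vB)
          (inputs.length : Int) ((inputs.headI.toList.length : Nat) : Int)
          ((((inputs.length : Int)) * ((inputs.headI.toList.length : Nat) : Int)).toNat + 1)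
          PySem.Set.empty := fun h => hcF (hperm.mem_iff.2 h)
      have hcon : PySem.Set.contains _ (c.1, c.2) = false :=
        pv_contains_false_iff.2 hcS
      have hcl := hFcl c hc hcF
      have hcl' : vA c + 1 + pvIndeg c F' ≤ 9 := hcl
      have hnn := pv_indeg_nonneg c F'
      refine ⟨?_, ?_, ?_⟩
      · simp only [hcF, if_false, hcon, Bool.false_eq_true]
        rw [hlook, hfn, ← hind, hagc.1]
      · simp only [hcF, if_false]
        have := hagc.2.1
        omega
      · simp only [hcF, if_false]
        omega
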